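-- pv_equiv track=rewrite | github.com/heitorchang/learn-code | codefights/tourneys/20170616_1530.py | concatenationProcess
-- ===== SOURCE A (Python) =====
-- def concatenationProcess(init):
--     # PWNAGED
--     while len(init) > 1:
--         minInd1 = 0
--         minInd2 = len(init) - 1
--
--         for i in range(1, len(init)):
--             if len(init[i]) < len(init[minInd1]):
--                 minInd1 = i
--
--         if minInd2 == minInd1:
--             minInd2 -= 1
--
--         for i in range(len(init) - 2, -1, -1):
--             if (len(init[i]) < len(init[minInd2])
--             and i != minInd1):
--                 minInd2 = i
--
--         init.append(init[minInd1] + init[minInd2])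
--         init = init[:max(minInd1, minInd2)] + init[max(minInd1, minInd2) + 1:]
--         init = init[:min(minInd1, minInd2)] + init[min(minInd1, minInd2) + 1:]
--
--     return init[0]
-- ===== SOURCE B (Python) =====
-- def concatenationProcess(init):
--     # Sorted-pool algorithm: tag each string with a sequence number, sort the
--     # pool once by (length, seq) and KEEP it sorted.  The head of the pool is
--     # always the first shortest string; after removing the head, the last
--     # element of the head's equal-length run is the last shortest among the
--     # rest.  The merged string gets a fresh (maximal) seq and is inserted back
--     # at its sorted position, so no per-round minimum scan is ever needed.
--     # Return value only (A also appends one element to the caller's list).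
--     items = sorted((len(s), i, s) for i, s in enumerate(init))
--     seq = len(init)
--     while len(items) > 1:
--         _, _, s1 = items.pop(0)
--         # length of the minimal-length run at the front of the remainder
--         j = 1
--         while j < len(items) and items[j][0] == items[0][0]:
--             j += 1
--         _, _, s2 = items.pop(j - 1)
--         merged = s1 + s2
--         L = len(merged)
--         # sorted insertion point: after every entry with length <= L
--         # (the fresh seq is maximal, so ties on length go before the new entry)
--         k = 0
--         while k < len(items) and items[k][0] <= L:
--             k += 1
--         items.insert(k, (L, seq, merged))
--         seq += 1
--     return items[0][2]
-- ===== Notes on version B (the rewrite author's own statement) =====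
-- stated objective: alternative
-- what changed: B keeps the pool of strings tagged with sequence numbers and SORTED by (length, seq): it sorts once up front, then each round pops the head (the first shortest), takes the last element of the head's equal-length run (the last shortest among the rest) and inserts the merged string back at its sorted position, instead of A's two full directional minimum scans and triple list-slicing per round.
-- outside the precondition, e.g. on concatenationProcess([]): A raises IndexError, B raises IndexError
import Mathlib
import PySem

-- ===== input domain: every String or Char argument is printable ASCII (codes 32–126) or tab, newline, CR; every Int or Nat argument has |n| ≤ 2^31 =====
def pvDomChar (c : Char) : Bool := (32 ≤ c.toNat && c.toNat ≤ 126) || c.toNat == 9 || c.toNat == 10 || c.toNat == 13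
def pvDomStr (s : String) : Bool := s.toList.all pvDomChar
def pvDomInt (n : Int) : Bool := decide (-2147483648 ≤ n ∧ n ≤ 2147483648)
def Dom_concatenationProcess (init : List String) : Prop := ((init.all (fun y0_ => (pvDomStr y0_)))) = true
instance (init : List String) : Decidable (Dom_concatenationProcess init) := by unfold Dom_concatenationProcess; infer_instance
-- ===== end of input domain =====

-- B replaces A's per-round pair of directional minimum scans by a pool kept SORTED by
-- (length, sequence number): sort once, pop the head (first shortest), take the last element
-- of the head's equal-length run (last shortest among the rest), and insert the merged string
-- back at its sorted position. Return value only (A also appends one element to the caller's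
-- list; B does not mutate its argument).

-- ===== PORT A =====
-- len(s[i]) for an Int index
def pvSLen (s : List String) (i : Int) : Int := PySem.Str.len (PySem.List.pyGetD s i "")

-- body of A's first for-loop (forward scan for minInd1)
def pvSelA1 (s : List String) (m i : Int) : Int :=
  if pvSLen s i < pvSLen s m then i else m

-- body of A's second for-loop (backward scan for minInd2, skipping minInd1)
def pvSelA2 (s : List String) (k1 m i : Int) : Int :=
  if pvSLen s i < pvSLen s m ∧ i ≠ k1 then i else m

-- one iteration of A's while-loop
def pvStepA (s : List String) : List String :=
  let n : Int := s.length
  let minInd1 := (PySem.List.pyRange 1 n).foldl (pvSelA1 s) 0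
  let m0 : Int := n - 1
  let m0 := if m0 = minInd1 then m0 - 1 else m0
  let minInd2 := (PySem.List.pyRange (n - 2) (-1) (-1)).foldl (pvSelA2 s minInd1) m0
  let t0 := s ++ [PySem.List.pyGetD s minInd1 "" ++ PySem.List.pyGetD s minInd2 ""]
  let hi := max minInd1 minInd2
  let t1 := PySem.List.slice t0 none (some hi) ++ PySem.List.slice t0 (some (hi + 1)) none
  let lo := min minInd1 minInd2
  PySem.List.slice t1 none (some lo) ++ PySem.List.slice t1 (some (lo + 1)) none

def pvLoopA : Nat → List String → List String
  | 0, s => s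
  | f + 1, s => if s.length > 1 then pvLoopA f (pvStepA s) else s

def concatenationProcess (init : List String) : String :=
  PySem.List.pyGetD (pvLoopA init.length init) 0 ""

-- ===== PORT B =====
-- sort key of a pool entry (len, seq, str): the tuple order on (len, seq)
def pvKey (e : Int × Int × String) : Lex (Int × Int) := toLex (e.1, e.2.1)

-- (len(s), i, s) for i, s in enumerate(init)
def pvTag (init : List String) : List (Int × Int × String) :=
  (PySem.List.enumerate init).map (fun z => (PySem.Str.len z.2, z.1, z.2))

-- Source B's first while loop: length of the leading run of entries of length m
def pvRunLen (m : Int) : List (Int × Int × String) → Nat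
  | [] => 0
  | e :: t => if e.1 = m then pvRunLen m t + 1 else 0

-- Source B's second while loop: number of leading entries of length ≤ L
def pvLeCount (L : Int) : List (Int × Int × String) → Nat
  | [] => 0
  | e :: t => if e.1 ≤ L then pvLeCount L t + 1 else 0

-- one iteration of Source B's outer while-loop (pop(0); run scan; pop(j-1); insert at k)
def pvRoundB (c : Int) : List (Int × Int × String) → List (Int × Int × String)
  | [] => []
  | x :: rest =>
    let m := (PySem.List.pyGetD rest 0 ((0 : Int), (0 : Int), "")).1
    let j := pvRunLen m rest
    let y := PySem.List.pyGetD rest ((j : Int) - 1) ((0 : Int), (0 : Int), "")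
    let rest' := rest.eraseIdx (j - 1)
    let merged := x.2.2 ++ y.2.2
    let L := PySem.Str.len merged
    PySem.List.insert rest' ((pvLeCount L rest' : Nat) : Int) (L, c, merged)

def pvLoopB : Nat → Int → List (Int × Int × String) → List (Int × Int × String)
  | 0, _, items => items
  | f + 1, c, items => if items.length > 1 then pvLoopB f (c + 1) (pvRoundB c items) else items

def concatenationProcess_alt (init : List String) : String :=
  (PySem.List.pyGetD
    (pvLoopB init.length (init.length : Int) (PySem.List.sorted (pvTag init) pvKey false))
    0 ((0 : Int), (0 : Int), "")).2.2

-- ===== PRECONDITION & SPEC =====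
-- Pre_ excludes only the empty list, on which A (and B) raise IndexError at 'init[0]'.
def Pre_concatenationProcess (init : List String) : Prop := init ≠ []
instance (init : List String) : Decidable (Pre_concatenationProcess init) := by
  unfold Pre_concatenationProcess; infer_instance

def pvWitness_concatenationProcess : List String := ["ab", "c", "def"]

def Spec_concatenationProcess (init : List String) (out : String) : Prop := out = concatenationProcess_alt init
instance (init : List String) (out : String) : Decidable (Spec_concatenationProcess init out) := by unfold Spec_concatenationProcess; infer_instance

-- ===== CLAIM (what is proved, stated in full; the proofs are below) =====
def Claim_equal_concatenationProcess : Prop := ∀ (init : List String), Dom_concatenationProcess init → Pre_concatenationProcess init → Spec_concatenationProcess init (concatenationProcess init)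

-- ===== LEMMAS AND PROOFS =====

-- p is the first index of minimal length in s
def pvP1 (s : List String) (k : Int) : Prop :=
  0 ≤ k ∧ k < s.length ∧
  (∀ j : Int, 0 ≤ j → j < s.length → pvSLen s k ≤ pvSLen s j) ∧
  (∀ j : Int, 0 ≤ j → j < k → pvSLen s k < pvSLen s j)

-- given k1, k is the last index ≠ k1 of minimal length among indices ≠ k1
def pvP2 (s : List String) (k1 k : Int) : Prop :=
  0 ≤ k ∧ k < s.length ∧ k ≠ k1 ∧
  (∀ j : Int, 0 ≤ j → j < s.length → j ≠ k1 → pvSLen s k ≤ pvSLen s j) ∧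
  (∀ j : Int, k < j → j < s.length → j ≠ k1 → pvSLen s k < pvSLen s j)

lemma pvP1_unique {s : List String} {k k' : Int} (h : pvP1 s k) (h' : pvP1 s k') : k = k' := by
  obtain ⟨hk0, hkn, hmin, hfst⟩ := h
  obtain ⟨hk0', hkn', hmin', hfst'⟩ := h'
  rcases lt_trichotomy k k' with hlt | heq | hgt
  · have := hfst' k hk0 hlt
    have := hmin k' hk0' hkn'
    omega
  · exact heq
  · have := hfst k' hk0' hgt
    have := hmin' k hk0 hkn
    omega

lemma pvP2_unique {s : List String} {k1 k k' : Int} (h : pvP2 s k1 k) (h' : pvP2 s k1 k') : k = k' := by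
  obtain ⟨hk0, hkn, hne, hmin, hlast⟩ := h
  obtain ⟨hk0', hkn', hne', hmin', hlast'⟩ := h'
  rcases lt_trichotomy k k' with hlt | heq | hgt
  · have := hlast k' hlt hkn' hne'
    have := hmin' k hk0 hkn hne
    omega
  · exact heq
  · have := hlast' k hgt hkn hne
    have := hmin k' hk0' hkn' hne'
    omega

lemma pvFoldA1_inv (s : List String) :
    ∀ (t : Nat) (a m : Int), ((s.length : Int) - a).toNat ≤ t →
    0 ≤ m → m < a → a ≤ (s.length : Int) →
    (∀ j : Int, 0 ≤ j → j < a → pvSLen s m ≤ pvSLen s j) →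
    (∀ j : Int, 0 ≤ j → j < m → pvSLen s m < pvSLen s j) →
    pvP1 s ((PySem.List.pyRange a s.length).foldl (pvSelA1 s) m) := by
  intro t
  induction t with
  | zero =>
      intro a m ht h0 h1 h2 h3 h4
      rw [PySem.List.pyRange_one_eq_nil (by omega), List.foldl_nil]
      exact ⟨h0, by omega, fun j hj hjn => h3 j hj (by omega), h4⟩
  | succ t ih =>
      intro a m ht h0 h1 h2 h3 h4
      by_cases hlt : a < (s.length : Int)
      · rw [PySem.List.pyRange_one_cons hlt, List.foldl_cons]
        by_cases hsa : pvSLen s a < pvSLen s m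
        · have hm' : pvSelA1 s m a = a := by simp [pvSelA1, hsa]
          rw [hm']
          refine ih (a + 1) a (by omega) (by omega) (by omega) (by omega) ?_ ?_
          · intro j hj hja
            rcases (by omega : j < a ∨ j = a) with hc | hc
            · exact le_of_lt (lt_of_lt_of_le hsa (h3 j hj hc))
            · subst hc; exact le_refl _
          · intro j hj hja
            exact lt_of_lt_of_le hsa (h3 j hj hja)
        · have hm' : pvSelA1 s m a = m := by simp [pvSelA1, hsa]
          rw [hm']
          refine ih (a + 1) m (by omega) h0 (by omega) (by omega) ?_ h4
          intro j hj hja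
          rcases (by omega : j < a ∨ j = a) with hc | hc
          · exact h3 j hj hc
          · subst hc; omega
      · rw [PySem.List.pyRange_one_eq_nil (by omega), List.foldl_nil]
        exact ⟨h0, by omega, fun j hj hjn => h3 j hj (by omega), h4⟩

lemma pvFoldA2_inv (s : List String) (k1 : Int) :
    ∀ (t : Nat) (b m : Int), (b + 1).toNat ≤ t →
    b < (s.length : Int) →
    0 ≤ m → m < s.length → m ≠ k1 →
    (∀ j : Int, b < j → j < s.length → j ≠ k1 → pvSLen s m ≤ pvSLen s j) →
    (∀ j : Int, m < j → j < s.length → j ≠ k1 → pvSLen s m < pvSLen s j) →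
    pvP2 s k1 ((PySem.List.pyRange b (-1) (-1)).foldl (pvSelA2 s k1) m) := by
  intro t
  induction t with
  | zero =>
      intro b m ht hb h0 h1 h2 h3 h4
      rw [PySem.List.pyRange_neg_one_eq_nil (by omega), List.foldl_nil]
      exact ⟨h0, h1, h2, fun j hj hjn hjk => h3 j (by omega) hjn hjk, h4⟩
  | succ t ih =>
      intro b m ht hb h0 h1 h2 h3 h4
      by_cases hbn : -1 < b
      · rw [PySem.List.pyRange_neg_one_cons (by omega), List.foldl_cons]
        by_cases hc : pvSLen s b < pvSLen s m ∧ b ≠ k1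
        · have hm' : pvSelA2 s k1 m b = b := by simp [pvSelA2, hc.1, hc.2]
          rw [hm']
          refine ih (b - 1) b (by omega) (by omega) (by omega) (by omega) hc.2 ?_ ?_
          · intro j hj hjn hjk
            rcases (by omega : j = b ∨ b < j) with hcc | hcc
            · subst hcc; exact le_refl _
            · exact le_of_lt (lt_of_lt_of_le hc.1 (h3 j hcc hjn hjk))
          · intro j hj hjn hjk
            exact lt_of_lt_of_le hc.1 (h3 j hj hjn hjk)
        · have hm' : pvSelA2 s k1 m b = m := by
            simp only [pvSelA2, if_neg hc]
          rw [hm']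
          refine ih (b - 1) m (by omega) (by omega) h0 h1 h2 ?_ h4
          intro j hj hjn hjk
          rcases (by omega : j = b ∨ b < j) with hcc | hcc
          · subst hcc
            rcases Decidable.em (pvSLen s j < pvSLen s m) with hx | hx
            · exact absurd ⟨hx, hjk⟩ hc
            · omega
          · exact h3 j hcc hjn hjk
      · rw [PySem.List.pyRange_neg_one_eq_nil (by omega), List.foldl_nil]
        exact ⟨h0, h1, h2, fun j hj hjn hjk => h3 j (by omega) hjn hjk, h4⟩

-- A's append + two slice-deletions, in canonical take/drop form
lemma pvRemoveA (s : List String) (c : String) (i1 i2 : Int)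
    (h1 : 0 ≤ i1) (h2 : i1 < s.length) (h3 : 0 ≤ i2) (h4 : i2 < s.length) (hne : i1 ≠ i2) :
    PySem.List.slice
        (PySem.List.slice (s ++ [c]) none (some (max i1 i2)) ++
         PySem.List.slice (s ++ [c]) (some (max i1 i2 + 1)) none) none (some (min i1 i2)) ++
      PySem.List.slice
        (PySem.List.slice (s ++ [c]) none (some (max i1 i2)) ++
         PySem.List.slice (s ++ [c]) (some (max i1 i2 + 1)) none) (some (min i1 i2 + 1)) none =
    s.take (min i1 i2).toNat ++
      ((s.drop ((min i1 i2).toNat + 1)).take ((max i1 i2).toNat - ((min i1 i2).toNat + 1))) ++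
      s.drop ((max i1 i2).toNat + 1) ++ [c] := by
  set lo : Int := min i1 i2 with hlo
  set hi : Int := max i1 i2 with hhi
  have hlo0 : 0 ≤ lo := by omega
  have hhi0 : 0 ≤ hi := by omega
  have hlh : lo.toNat < hi.toNat := by omega
  have hhn : hi.toNat < s.length := by omega
  have e1 : (hi + 1).toNat = hi.toNat + 1 := by omega
  have e2 : (lo + 1).toNat = lo.toNat + 1 := by omega
  rw [PySem.List.slice_to _ hhi0, PySem.List.slice_from _ (by omega : (0:Int) ≤ hi + 1), e1,
      List.take_append_of_le_length (by omega), List.drop_append_of_le_length (by omega)]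
  have hlen : (s.take hi.toNat).length = hi.toNat := by simp; omega
  rw [PySem.List.slice_to _ hlo0, PySem.List.slice_from _ (by omega : (0:Int) ≤ lo + 1), e2,
      List.take_append_of_le_length (by omega), List.drop_append_of_le_length (by omega),
      List.take_take, List.drop_take, min_eq_left (by omega)]
  simp [List.append_assoc]

-- pvStepA in canonical form, at ANY pair of indices satisfying pvP1/pvP2
lemma pvStepA_canon (s : List String) (h : 2 ≤ s.length) (p1 p2 : Int)
    (hp1 : pvP1 s p1) (hp2 : pvP2 s p1 p2) :
    pvStepA s =
      s.take (min p1 p2).toNat ++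
        ((s.drop ((min p1 p2).toNat + 1)).take ((max p1 p2).toNat - ((min p1 p2).toNat + 1))) ++
        s.drop ((max p1 p2).toNat + 1) ++
        [PySem.List.pyGetD s p1 "" ++ PySem.List.pyGetD s p2 ""] := by
  have h2 : (2 : Int) ≤ (s.length : Int) := by exact_mod_cast h
  unfold pvStepA
  dsimp only
  have hA1 : pvP1 s ((PySem.List.pyRange 1 (s.length : Int)).foldl (pvSelA1 s) 0) := by
    refine pvFoldA1_inv s ((s.length : Int) - 1).toNat 1 0 (by omega) (by omega) (by omega) (by omega) ?_ ?_
    · intro j hj hja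
      have hj0 : j = 0 := by omega
      subst hj0; exact le_refl _
    · intro j hj hja; omega
  set i1 : Int := (PySem.List.pyRange 1 (s.length : Int)).foldl (pvSelA1 s) 0 with hi1def
  have hA2 : pvP2 s i1 ((PySem.List.pyRange ((s.length : Int) - 2) (-1) (-1)).foldl (pvSelA2 s i1)
      (if (s.length : Int) - 1 = i1 then (s.length : Int) - 1 - 1 else (s.length : Int) - 1)) := by
    obtain ⟨hb0, hbn, _, _⟩ := hA1
    by_cases hm : (s.length : Int) - 1 = i1
    · rw [if_pos hm]
      refine pvFoldA2_inv s i1 ((s.length : Int) - 1).toNat ((s.length : Int) - 2)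
        ((s.length : Int) - 1 - 1) (by omega) (by omega) (by omega) (by omega) (by omega) ?_ ?_
      · intro j hj hjn hjk
        have : j = (s.length : Int) - 1 := by omega
        omega
      · intro j hj hjn hjk
        have : j = (s.length : Int) - 1 := by omega
        omega
    · rw [if_neg hm]
      refine pvFoldA2_inv s i1 ((s.length : Int) - 1).toNat ((s.length : Int) - 2)
        ((s.length : Int) - 1) (by omega) (by omega) (by omega) (by omega) (by omega) ?_ ?_
      · intro j hj hjn hjk
        have hje : j = (s.length : Int) - 1 := by omega
        subst hje; exact le_refl _
      · intro j hj hjn hjk; omega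
  set i2 : Int := (PySem.List.pyRange ((s.length : Int) - 2) (-1) (-1)).foldl (pvSelA2 s i1)
      (if (s.length : Int) - 1 = i1 then (s.length : Int) - 1 - 1 else (s.length : Int) - 1) with hi2def
  have he1 : i1 = p1 := pvP1_unique hA1 hp1
  have he2 : i2 = p2 := pvP2_unique (he1 ▸ hA2) hp2
  rw [he1, he2]
  exact pvRemoveA s _ p1 p2 hp1.1 hp1.2.1 hp2.1 hp2.2.1 (fun hx => hp2.2.2.1 hx.symm)

-- ===== B-side machinery =====

-- strict (length, seq) order on pool entries
def pvLexLt (a b : Int × Int × String) : Prop :=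
  a.1 < b.1 ∨ (a.1 = b.1 ∧ a.2.1 < b.2.1)

-- strict seq order (position order in A's list)
def pvSeqLt (a b : Int × Int × String) : Prop := a.2.1 < b.2.1

-- B's pool invariant: sorted by (length, seq), distinct seqs, consistent lengths, seqs < c
def pvInv (items : List (Int × Int × String)) (c : Int) : Prop :=
  items.Pairwise pvLexLt ∧
  items.Pairwise (fun a b => a.2.1 ≠ b.2.1) ∧
  ∀ e ∈ items, e.1 = PySem.Str.len e.2.2 ∧ e.2.1 < c

-- string lengths of the seq-ordered projection, read off the entries
lemma pvSLen_proj (u : List (Int × Int × String))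
    (hc : ∀ e ∈ u, e.1 = PySem.Str.len e.2.2) (j : Nat) (h1 : j < u.length) :
    pvSLen (u.map (fun e => e.2.2)) (j : Int) = (u[j]'h1).1 := by
  have hj : j < (u.map (fun e => e.2.2)).length := by simpa using h1
  simp only [pvSLen, PySem.List.pyGetD_natCast, List.getD_eq_getElem?_getD,
    List.getElem?_eq_getElem hj, Option.getD_some, List.getElem_map]
  exact (hc _ (List.getElem_mem h1)).symm

-- pvRunLen facts
lemma pvRunLen_le_length (m : Int) (l : List (Int × Int × String)) : pvRunLen m l ≤ l.length := by
  induction l with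
  | nil => simp [pvRunLen]
  | cons e t ih => by_cases h : e.1 = m <;> simp [pvRunLen, h] <;> omega

lemma pvRunLen_pos (m : Int) (e : Int × Int × String) (t : List (Int × Int × String))
    (he : e.1 = m) : 0 < pvRunLen m (e :: t) := by
  rw [pvRunLen, if_pos he]; omega

lemma pvRunLen_take (m : Int) (l : List (Int × Int × String)) :
    ∀ a ∈ l.take (pvRunLen m l), a.1 = m := by
  induction l with
  | nil => simp
  | cons e t ih =>
      by_cases h : e.1 = m
      · rw [pvRunLen, if_pos h]
        intro a ha
        rcases List.mem_cons.mp (by simpa using ha) with rfl | ha'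
        · exact h
        · exact ih a ha'
      · rw [pvRunLen, if_neg h]
        simp

lemma pvRunLen_drop (m : Int) (l : List (Int × Int × String))
    (hs : l.Pairwise (fun a b => a.1 ≤ b.1)) (hm : ∀ a ∈ l, m ≤ a.1) :
    ∀ b ∈ l.drop (pvRunLen m l), m < b.1 := by
  induction l with
  | nil => simp
  | cons e t ih =>
      by_cases h : e.1 = m
      · rw [pvRunLen, if_pos h]
        simp only [List.drop_succ_cons]
        exact ih (List.Pairwise.of_cons hs) (fun a ha => hm a (List.mem_cons_of_mem e ha))
      · rw [pvRunLen, if_neg h]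
        simp only [List.drop_zero]
        intro b hb
        rcases List.mem_cons.mp hb with rfl | hb'
        · have := hm b (List.mem_cons_self)
          omega
        · have h1 := (List.pairwise_cons.mp hs).1 b hb'
          have h2 := hm e List.mem_cons_self
          omega

-- pvLeCount facts
lemma pvLeCount_le_length (L : Int) (l : List (Int × Int × String)) : pvLeCount L l ≤ l.length := by
  induction l with
  | nil => simp [pvLeCount]
  | cons e t ih => by_cases h : e.1 ≤ L <;> simp [pvLeCount, h] <;> omega

lemma pvLeCount_take (L : Int) (l : List (Int × Int × String)) :
    ∀ a ∈ l.take (pvLeCount L l), a.1 ≤ L := by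
  induction l with
  | nil => simp
  | cons e t ih =>
      by_cases h : e.1 ≤ L
      · rw [pvLeCount, if_pos h]
        intro a ha
        rcases List.mem_cons.mp (by simpa using ha) with rfl | ha'
        · exact h
        · exact ih a ha'
      · rw [pvLeCount, if_neg h]
        simp

lemma pvLeCount_drop (L : Int) (l : List (Int × Int × String))
    (hs : l.Pairwise (fun a b => a.1 ≤ b.1)) :
    ∀ b ∈ l.drop (pvLeCount L l), L < b.1 := by
  induction l with
  | nil => simp
  | cons e t ih =>
      by_cases h : e.1 ≤ L
      · rw [pvLeCount, if_pos h]
        simp only [List.drop_succ_cons]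
        exact ih (List.Pairwise.of_cons hs)
      · rw [pvLeCount, if_neg h]
        simp only [List.drop_zero]
        intro b hb
        rcases List.mem_cons.mp hb with rfl | hb'
        · omega
        · have := (List.pairwise_cons.mp hs).1 b hb'
          omega

-- two eraseIdx's in canonical take/drop form
lemma pvEraseTwo (u : List (Int × Int × String)) (lo hi : Nat) (h1 : lo < hi) (h2 : hi < u.length) :
    (u.eraseIdx hi).eraseIdx lo =
      u.take lo ++ (u.drop (lo + 1)).take (hi - (lo + 1)) ++ u.drop (hi + 1) := by
  have hlt : (u.take hi).length = hi := by simp; omega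
  rw [List.eraseIdx_eq_take_drop_succ, List.eraseIdx_eq_take_drop_succ,
      List.take_append_of_le_length (by omega), List.drop_append_of_le_length (by omega),
      List.take_take, min_eq_left (by omega), List.drop_take]
  simp [List.append_assoc]

-- inserting in the middle preserves Pairwise when the element fits
lemma pvPairwise_middle {R : (Int × Int × String) → (Int × Int × String) → Prop}
    (l : List (Int × Int × String)) (k : Nat) (e : Int × Int × String)
    (hp : l.Pairwise R)
    (h1 : ∀ a ∈ l.take k, R a e) (h2 : ∀ b ∈ l.drop k, R e b) :
    (l.take k ++ e :: l.drop k).Pairwise R := by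
  have hp' : (l.take k ++ l.drop k).Pairwise R := by rw [List.take_append_drop]; exact hp
  have hcross := (List.pairwise_append.mp hp').2.2
  rw [List.pairwise_append]
  refine ⟨(List.pairwise_append.mp hp').1, ?_, ?_⟩
  · rw [List.pairwise_cons]
    exact ⟨h2, (List.pairwise_append.mp hp').2.1⟩
  · intro a ha b hb
    rcases List.mem_cons.mp hb with rfl | hb'
    · exact h1 a ha
    · exact hcross a ha b hb'

-- removing the element at an index, as a permutation
lemma pvPermErase {α : Type} (l : List α) (i : Nat) (h : i < l.length) :
    l.Perm ((l[i]'h) :: l.eraseIdx i) := by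
  conv_lhs => rw [← List.take_append_drop i l, List.drop_eq_getElem_cons h]
  rw [List.eraseIdx_eq_take_drop_succ]
  exact List.perm_middle

-- ===== the round simulation =====

lemma pvRound_sim (x : Int × Int × String) (rest : List (Int × Int × String)) (c : Int)
    (u : List (Int × Int × String))
    (hinv : pvInv (x :: rest) c) (hne : rest ≠ [])
    (hperm : u.Perm (x :: rest)) (hsorted : u.Pairwise pvSeqLt) :
    ∃ u' : List (Int × Int × String), u'.Perm (pvRoundB c (x :: rest)) ∧ u'.Pairwise pvSeqLt ∧
      pvStepA (u.map (fun e => e.2.2)) = u'.map (fun e => e.2.2) ∧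
      pvInv (pvRoundB c (x :: rest)) (c + 1) := by
  obtain ⟨hpw, hsne, hmemc⟩ := hinv
  obtain ⟨e0, t, rfl⟩ : ∃ e0 t, rest = e0 :: t := by
    cases rest with
    | nil => exact absurd rfl hne
    | cons e0 t => exact ⟨e0, t, rfl⟩
  -- the values Source B computes in this round
  set m : Int := (PySem.List.pyGetD (e0 :: t) 0 ((0 : Int), (0 : Int), "")).1 with hmdef
  have hm : m = e0.1 := by rw [hmdef, PySem.List.pyGetD_zero_cons]
  set r : Nat := pvRunLen m (e0 :: t) with hrdef
  have hr1 : 1 ≤ r := pvRunLen_pos m e0 t hm.symm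
  have hr2 : r ≤ (e0 :: t).length := pvRunLen_le_length m (e0 :: t)
  have hlt : r - 1 < (e0 :: t).length := by simp only [List.length_cons] at hr2 ⊢; omega
  set y : Int × Int × String := PySem.List.pyGetD (e0 :: t) ((r : Int) - 1) ((0 : Int), (0 : Int), "") with hydef
  have hidxc : ((r : Int) - 1) = ((r - 1 : Nat) : Int) := by omega
  have hyget : y = (e0 :: t)[r - 1]'hlt := by
    rw [hydef, hidxc, PySem.List.pyGetD_natCast, List.getD_eq_getElem?_getD,
        List.getElem?_eq_getElem hlt, Option.getD_some]
  have hr1' : r - 1 + 1 = r := by omega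
  have hdecomp : e0 :: t = (e0 :: t).take (r - 1) ++ y :: (e0 :: t).drop r := by
    conv_lhs => rw [← List.take_append_drop (r - 1) (e0 :: t)]
    rw [List.drop_eq_getElem_cons hlt, hr1', ← hyget]
  set rest' : List (Int × Int × String) := (e0 :: t).eraseIdx (r - 1) with hrest'def
  have hrest' : rest' = (e0 :: t).take (r - 1) ++ (e0 :: t).drop r := by
    rw [hrest'def, List.eraseIdx_eq_take_drop_succ, hr1']
  -- run facts
  have htake_run : ∀ a ∈ (e0 :: t).take r, a.1 = m := pvRunLen_take m (e0 :: t)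
  have hpw_rest : (e0 :: t).Pairwise pvLexLt := (List.pairwise_cons.mp hpw).2
  have hx_rest : ∀ e ∈ e0 :: t, pvLexLt x e := (List.pairwise_cons.mp hpw).1
  have hle1 : (e0 :: t).Pairwise (fun a b => a.1 ≤ b.1) :=
    hpw_rest.imp (fun h => by unfold pvLexLt at h; omega)
  have hmin_rest : ∀ a ∈ e0 :: t, m ≤ a.1 := by
    intro a ha
    rcases List.mem_cons.mp ha with rfl | ha'
    · omega
    · have := (List.pairwise_cons.mp hle1).1 a ha'
      omega
  have hdrop_run : ∀ b ∈ (e0 :: t).drop r, m < b.1 := pvRunLen_drop m (e0 :: t) hle1 hmin_rest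
  have htr : (e0 :: t).take r = (e0 :: t).take (r - 1) ++ [y] := by
    conv_lhs => rw [← hr1']
    rw [List.take_succ, List.getElem?_eq_getElem hlt, ← hyget]
    simp
  have hy1 : y.1 = m := htake_run y (by rw [htr]; exact List.mem_append_right _ List.mem_cons_self)
  have hy_rest : y ∈ e0 :: t := by
    rw [hdecomp]
    exact List.mem_append_right _ List.mem_cons_self
  have hymax : ∀ a ∈ e0 :: t, a.1 = m → a = y ∨ a.2.1 < y.2.1 := by
    intro a ha ham
    rw [hdecomp] at ha
    rcases List.mem_append.mp ha with hta | hya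
    · have hpwd : ((e0 :: t).take (r - 1) ++ y :: (e0 :: t).drop r).Pairwise pvLexLt :=
        hdecomp ▸ hpw_rest
      have hcr := (List.pairwise_append.mp hpwd).2.2 a hta y List.mem_cons_self
      unfold pvLexLt at hcr
      right; omega
    · rcases List.mem_cons.mp hya with rfl | hda
      · exact Or.inl rfl
      · have := hdrop_run a hda
        omega
  -- u-side facts
  have hulen : u.length = t.length + 2 := by
    have := hperm.length_eq
    simpa using this
  have humem : ∀ e, e ∈ u ↔ e = x ∨ e ∈ e0 :: t := by
    intro e
    rw [hperm.mem_iff]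
    exact List.mem_cons
  have hcons : ∀ e ∈ u, e.1 = PySem.Str.len e.2.2 := fun e he => (hmemc e (hperm.subset he)).1
  have hseq_lt_c : ∀ e ∈ u, e.2.1 < c := fun e he => (hmemc e (hperm.subset he)).2
  have hidxseq : ∀ i j (hi : i < u.length) (hj : j < u.length), i < j →
      (u[i]'hi).2.1 < (u[j]'hj).2.1 := by
    intro i j hi hj hij
    exact List.pairwise_iff_getElem.mp hsorted i j hi hj hij
  obtain ⟨p1, hp1lt, hp1x⟩ := List.getElem_of_mem ((humem x).mpr (Or.inl rfl))
  obtain ⟨p2, hp2lt, hp2y⟩ := List.getElem_of_mem ((humem y).mpr (Or.inr hy_rest))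
  have hxy : x ≠ y := by
    have h1 := (List.pairwise_cons.mp hsne).1 y hy_rest
    intro h
    rw [h] at h1
    exact h1 rfl
  have hp12 : p1 ≠ p2 := by
    intro h
    subst h
    exact hxy (hp1x.symm.trans hp2y)
  have hgetne : ∀ i j (hi : i < u.length) (hj : j < u.length), i ≠ j →
      (u[i]'hi) ≠ (u[j]'hj) := by
    intro i j hi hj hij hEq
    rcases Nat.lt_or_ge i j with hlt' | hge
    · have := hidxseq i j hi hj hlt'
      rw [hEq] at this
      omega
    · have hlt' : j < i := by omega
      have := hidxseq j i hj hi hlt'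
      rw [hEq] at this
      omega
  set s : List String := u.map (fun e => e.2.2) with hsdef
  have hslen : s.length = u.length := by simp [hsdef]
  have hsl : ∀ (j : Nat) (h : j < u.length), pvSLen s (j : Int) = (u[j]'h).1 :=
    fun j h => pvSLen_proj u hcons j h
  have hnotx : ∀ (j : Nat) (hj : j < u.length), j ≠ p1 → (u[j]'hj) ∈ e0 :: t := by
    intro j hj hjp
    have hne' : (u[j]'hj) ≠ x := by
      intro hEq
      rw [← hp1x] at hEq
      exact hgetne j p1 hj hp1lt hjp hEq
    rcases (humem _).mp (List.getElem_mem hj) with he | he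
    · exact absurd he hne'
    · exact he
  -- A's two selections are exactly the positions of x and y
  have hP1 : pvP1 s (p1 : Nat) := by
    refine ⟨by omega, by rw [hslen]; exact_mod_cast hp1lt, ?_, ?_⟩
    · intro j hj0 hjn
      have hjn' : j.toNat < u.length := by rw [hslen] at hjn; omega
      have hj' : j = ((j.toNat : Nat) : Int) := by omega
      rw [hj', hsl j.toNat hjn', hsl p1 hp1lt, hp1x]
      rcases (humem _).mp (List.getElem_mem hjn') with he | he
      · rw [← he]
      · have := hx_rest _ he
        unfold pvLexLt at this
        omega
    · intro j hj0 hjp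
      have hjn' : j.toNat < u.length := by omega
      have hj' : j = ((j.toNat : Nat) : Int) := by omega
      rw [hj', hsl j.toNat hjn', hsl p1 hp1lt, hp1x]
      have hmem' : (u[j.toNat]'hjn') ∈ e0 :: t := hnotx j.toNat hjn' (by omega)
      have hlex := hx_rest _ hmem'
      have hseq : (u[j.toNat]'hjn').2.1 < (u[p1]'hp1lt).2.1 := hidxseq _ _ _ _ (by omega)
      rw [hp1x] at hseq
      unfold pvLexLt at hlex
      omega
  have hP2 : pvP2 s (p1 : Nat) (p2 : Nat) := by
    refine ⟨by omega, by rw [hslen]; exact_mod_cast hp2lt, ?_, ?_, ?_⟩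
    · intro hI
      exact hp12 (by exact_mod_cast hI.symm)
    · intro j hj0 hjn hjp
      have hjn' : j.toNat < u.length := by rw [hslen] at hjn; omega
      have hj' : j = ((j.toNat : Nat) : Int) := by omega
      rw [hj', hsl j.toNat hjn', hsl p2 hp2lt, hp2y]
      have hmem' : (u[j.toNat]'hjn') ∈ e0 :: t := by
        refine hnotx j.toNat hjn' ?_
        intro hEq
        apply hjp
        rw [hj', hEq]
      have := hmin_rest _ hmem'
      omega
    · intro j hjp hjn hjp1
      have hjn' : j.toNat < u.length := by rw [hslen] at hjn; omega
      have hj' : j = ((j.toNat : Nat) : Int) := by omega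
      rw [hj', hsl j.toNat hjn', hsl p2 hp2lt, hp2y]
      have hmem' : (u[j.toNat]'hjn') ∈ e0 :: t := by
        refine hnotx j.toNat hjn' ?_
        intro hEq
        apply hjp1
        rw [hj', hEq]
      have hjgt : p2 < j.toNat := by omega
      have hseq : (u[p2]'hp2lt).2.1 < (u[j.toNat]'hjn').2.1 := hidxseq _ _ _ _ hjgt
      rw [hp2y] at hseq
      have hney : (u[j.toNat]'hjn') ≠ y := by
        intro hEq
        rw [← hp2y] at hEq
        exact hgetne j.toNat p2 hjn' hp2lt (by omega) hEq
      have hge := hmin_rest _ hmem'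
      by_cases hcase : (u[j.toNat]'hjn').1 = m
      · rcases hymax _ hmem' hcase with hEq | hlt'
        · exact absurd hEq hney
        · omega
      · omega
  have hs2 : 2 ≤ s.length := by omega
  have hcanon := pvStepA_canon s hs2 (p1 : Nat) (p2 : Nat) hP1 hP2
  set lo : Nat := min p1 p2 with hlodef
  set hi : Nat := max p1 p2 with hhidef
  have hlohi : lo < hi := by omega
  have hhi_lt : hi < u.length := by omega
  have hminI : (min ((p1 : Nat) : Int) ((p2 : Nat) : Int)).toNat = lo := by omega
  have hmaxI : (max ((p1 : Nat) : Int) ((p2 : Nat) : Int)).toNat = hi := by omega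
  have hsp1 : PySem.List.pyGetD s ((p1 : Nat) : Int) "" = x.2.2 := by
    rw [PySem.List.pyGetD_natCast, List.getD_eq_getElem?_getD,
        List.getElem?_eq_getElem (by omega : p1 < s.length), Option.getD_some]
    simp only [hsdef, List.getElem_map]
    rw [hp1x]
  have hsp2 : PySem.List.pyGetD s ((p2 : Nat) : Int) "" = y.2.2 := by
    rw [PySem.List.pyGetD_natCast, List.getD_eq_getElem?_getD,
        List.getElem?_eq_getElem (by omega : p2 < s.length), Option.getD_some]
    simp only [hsdef, List.getElem_map]
    rw [hp2y]
  set L : Int := PySem.Str.len (x.2.2 ++ y.2.2) with hLdef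
  set mergedE : Int × Int × String := (L, c, x.2.2 ++ y.2.2) with hmedef
  set k : Nat := pvLeCount L rest' with hkdef
  have hk_le : k ≤ rest'.length := pvLeCount_le_length L rest'
  have hround : pvRoundB c (x :: e0 :: t) = PySem.List.insert rest' ((k : Nat) : Int) mergedE := rfl
  have hins : PySem.List.insert rest' ((k : Nat) : Int) mergedE =
      rest'.take k ++ mergedE :: rest'.drop k := PySem.List.insert_natCast rest' k mergedE hk_le
  set E2 : List (Int × Int × String) := (u.eraseIdx hi).eraseIdx lo with hE2def
  set u' : List (Int × Int × String) := E2 ++ [mergedE] with hu'def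
  -- E2 is a permutation of rest'
  have hpermA : u.Perm ((u[hi]'hhi_lt) :: u.eraseIdx hi) := pvPermErase u hi hhi_lt
  have hlo_lt' : lo < (u.eraseIdx hi).length := by
    rw [List.length_eraseIdx, if_pos hhi_lt]
    omega
  have hE1get : ((u.eraseIdx hi)[lo]'hlo_lt') = u[lo]'(by omega) := by
    rw [List.getElem_eraseIdx, dif_pos hlohi]
  have hpermB : (u.eraseIdx hi).Perm ((u[lo]'(by omega : lo < u.length)) :: E2) := by
    have := pvPermErase (u.eraseIdx hi) lo hlo_lt'
    rw [hE1get] at this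
    exact this
  have hperm2 : u.Perm ((u[hi]'hhi_lt) :: (u[lo]'(by omega : lo < u.length)) :: E2) :=
    hpermA.trans (List.Perm.cons _ hpermB)
  have hpermxy : u.Perm (x :: y :: rest') := by
    refine hperm.trans (List.Perm.cons x ?_)
    rw [hrest']
    conv_lhs => rw [hdecomp]
    exact List.perm_middle
  have hE2rest' : E2.Perm rest' := by
    have hswap : ((u[hi]'hhi_lt) :: (u[lo]'(by omega : lo < u.length)) :: E2).Perm
        (x :: y :: E2) := by
      rcases Nat.lt_or_ge p1 p2 with hc | hc
      · have hgl : (u[lo]'(by omega : lo < u.length)) = x := by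
          simp only [show lo = p1 from by omega]
          exact hp1x
        have hgh : (u[hi]'hhi_lt) = y := by
          simp only [show hi = p2 from by omega]
          exact hp2y
        rw [hgl, hgh]
        exact List.Perm.swap x y E2
      · have hgl : (u[lo]'(by omega : lo < u.length)) = y := by
          simp only [show lo = p2 from by omega]
          exact hp2y
        have hgh : (u[hi]'hhi_lt) = x := by
          simp only [show hi = p1 from by omega]
          exact hp1x
        rw [hgl, hgh]
    have hchain : (x :: y :: E2).Perm (x :: y :: rest') :=
      (hperm2.trans hswap).symm.trans hpermxy
    exact hchain.cons_inv.cons_inv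
  have hpermfin : u'.Perm (pvRoundB c (x :: e0 :: t)) := by
    rw [hround, hins, hu'def]
    have h1 : (E2 ++ [mergedE]).Perm (mergedE :: E2) := by
      have := List.perm_middle (a := mergedE) (l₁ := E2) (l₂ := ([] : List (Int × Int × String)))
      simpa using this
    refine h1.trans ?_
    refine (List.Perm.cons mergedE hE2rest').trans ?_
    have h2 : (rest'.take k ++ mergedE :: rest'.drop k).Perm (mergedE :: (rest'.take k ++ rest'.drop k)) :=
      List.perm_middle
    rw [List.take_append_drop] at h2
    exact h2.symm
  -- u' is seq-sorted
  have hE2sub : E2.Sublist u := (List.eraseIdx_sublist _ _).trans (List.eraseIdx_sublist _ _)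
  have hsortedfin : u'.Pairwise pvSeqLt := by
    rw [hu'def, List.pairwise_append]
    refine ⟨hsorted.sublist hE2sub, by simp, ?_⟩
    intro a ha b hb
    rcases List.mem_singleton.mp hb with rfl
    have := hseq_lt_c a (hE2sub.subset ha)
    unfold pvSeqLt
    simpa [hmedef] using this
  -- the projections agree
  have hmapfin : pvStepA s = u'.map (fun e => e.2.2) := by
    rw [hcanon, hu'def, hminI, hmaxI, hE2def, pvEraseTwo u lo hi hlohi hhi_lt, hsp1, hsp2, hmedef]
    simp only [List.map_append, List.map_take, List.map_drop, List.map_cons, List.map_nil, hsdef]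
  -- the invariant is preserved
  have hr'sub : rest'.Sublist (e0 :: t) := by
    rw [hrest'def]
    exact List.eraseIdx_sublist _ _
  have hr'memc : ∀ a ∈ rest', a.1 = PySem.Str.len a.2.2 ∧ a.2.1 < c :=
    fun a ha => hmemc a (List.mem_cons_of_mem x (hr'sub.subset ha))
  have hinvfin : pvInv (pvRoundB c (x :: e0 :: t)) (c + 1) := by
    rw [hround, hins]
    refine ⟨?_, ?_, ?_⟩
    · refine pvPairwise_middle rest' k mergedE (hpw_rest.sublist hr'sub) ?_ ?_
      · intro a ha
        have h1 : a.1 ≤ L := pvLeCount_take L rest' a ha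
        have h2 := (hr'memc a (List.mem_of_mem_take ha)).2
        unfold pvLexLt
        rcases lt_or_eq_of_le h1 with h | h
        · left; simpa [hmedef] using h
        · right
          exact ⟨by simpa [hmedef] using h, by simpa [hmedef] using h2⟩
      · intro b hb
        have h1 : L < b.1 := pvLeCount_drop L rest' (hle1.sublist hr'sub) b hb
        unfold pvLexLt
        left
        simpa [hmedef] using h1
    · refine pvPairwise_middle rest' k mergedE
        (((List.pairwise_cons.mp hsne).2).sublist hr'sub) ?_ ?_
      · intro a ha
        have h2 := (hr'memc a (List.mem_of_mem_take ha)).2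
        simp only [hmedef]
        omega
      · intro b hb
        have h2 := (hr'memc b (List.mem_of_mem_drop hb)).2
        simp only [hmedef]
        omega
    · intro e he
      rcases List.mem_append.mp he with hta | hca
      · have := hr'memc e (List.mem_of_mem_take hta)
        exact ⟨this.1, by omega⟩
      · rcases List.mem_cons.mp hca with rfl | hda
        · exact ⟨rfl, by simp [hmedef]⟩
        · have := hr'memc e (List.mem_of_mem_drop hda)
          exact ⟨this.1, by omega⟩
  exact ⟨u', hpermfin, hsortedfin, hmapfin, hinvfin⟩

lemma pvRoundB_length (c : Int) (items : List (Int × Int × String)) (h : 1 < items.length) :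
    (pvRoundB c items).length = items.length - 1 := by
  match items, h with
  | x :: e0 :: t, _ =>
    have hm : (PySem.List.pyGetD (e0 :: t) 0 ((0 : Int), (0 : Int), "")).1 = e0.1 := by
      rw [PySem.List.pyGetD_zero_cons]
    have hpos := pvRunLen_pos _ e0 t hm.symm
    have hle := pvRunLen_le_length ((PySem.List.pyGetD (e0 :: t) 0 ((0 : Int), (0 : Int), "")).1) (e0 :: t)
    show (PySem.List.insert _ _ _).length = _
    rw [PySem.List.length_insert, List.length_eraseIdx]
    simp only [List.length_cons] at hle ⊢
    rw [if_pos (by omega)]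
    omega

-- ===== the loop simulation =====

lemma pvLoop_sim : ∀ (f : Nat) (items u : List (Int × Int × String)) (c : Int),
    pvInv items c → u.Perm items → u.Pairwise pvSeqLt →
    ∃ u' : List (Int × Int × String), u'.Perm (pvLoopB f c items) ∧ u'.Pairwise pvSeqLt ∧
      pvLoopA f (u.map (fun e => e.2.2)) = u'.map (fun e => e.2.2) := by
  intro f
  induction f with
  | zero =>
      intro items u c hinv hperm hsorted
      exact ⟨u, hperm, hsorted, rfl⟩
  | succ f ih =>
      intro items u c hinv hperm hsorted
      have hlen : (u.map (fun e => e.2.2)).length = items.length := by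
        simp [hperm.length_eq]
      by_cases hg : items.length > 1
      · match items, hinv, hperm, hg, hlen with
        | x :: rest, hinv, hperm, hg, hlen =>
          have hne : rest ≠ [] := by
            intro hnil
            rw [hnil] at hg
            simp at hg
          obtain ⟨u2, hp2, hs2, hmap2, hinv2⟩ := pvRound_sim x rest c u hinv hne hperm hsorted
          obtain ⟨u', hp', hs', hmap'⟩ := ih (pvRoundB c (x :: rest)) u2 (c + 1) hinv2 hp2 hs2
          refine ⟨u', ?_, hs', ?_⟩
          · rw [pvLoopB, if_pos hg]
            exact hp'
          · rw [pvLoopA, if_pos (by omega)]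
            rw [hmap2, hmap']
      · refine ⟨u, ?_, hsorted, ?_⟩
        · rw [pvLoopB, if_neg hg]
          exact hperm
        · rw [pvLoopA, if_neg (by omega)]

lemma pvLoopB_length_one : ∀ (f : Nat) (c : Int) (items : List (Int × Int × String)),
    items ≠ [] → items.length ≤ f + 1 → (pvLoopB f c items).length = 1 := by
  intro f
  induction f with
  | zero =>
      intro c items h1 h2
      have := List.length_pos_iff.mpr h1
      simp only [pvLoopB]
      omega
  | succ f ih =>
      intro c items h1 h2
      by_cases hg : items.length > 1
      · simp only [pvLoopB, if_pos hg]
        refine ih (c + 1) (pvRoundB c items) ?_ ?_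
        · have := pvRoundB_length c items hg
          intro hnil
          rw [hnil] at this
          simp at this
          omega
        · have := pvRoundB_length c items hg
          omega
      · simp only [pvLoopB, if_neg hg]
        have := List.length_pos_iff.mpr h1
        omega

-- initial pool facts
lemma pvTag_proj (init : List String) : (pvTag init).map (fun e => e.2.2) = init := by
  simp only [pvTag, List.map_map]
  exact PySem.List.map_snd_enumerate init 0

lemma pvTag_seq_sorted (init : List String) : (pvTag init).Pairwise pvSeqLt := by
  unfold pvTag pvSeqLt
  refine List.Pairwise.map _ ?_ (PySem.List.pairwise_lt_enumerate init 0)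
  intro a b hab
  simpa using hab

lemma pvTag_seq_ne (init : List String) :
    (pvTag init).Pairwise (fun a b => a.2.1 ≠ b.2.1) :=
  (pvTag_seq_sorted init).imp (fun h => by unfold pvSeqLt at h; omega)

lemma pvInit_inv (init : List String) :
    pvInv (PySem.List.sorted (pvTag init) pvKey false) (init.length : Int) := by
  have hperm := PySem.List.sorted_perm (pvTag init) pvKey false
  have hne : (PySem.List.sorted (pvTag init) pvKey false).Pairwise (fun a b => a.2.1 ≠ b.2.1) :=
    (List.Perm.pairwise_iff (fun h => Ne.symm h) hperm).mpr (pvTag_seq_ne init)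
  have hle : (PySem.List.sorted (pvTag init) pvKey false).Pairwise (fun a b => pvKey a ≤ pvKey b) :=
    PySem.List.sorted_pairwise (pvTag init) pvKey
  refine ⟨?_, hne, ?_⟩
  · refine (hle.and hne).imp ?_
    rintro a b ⟨hab, hne'⟩
    have hlt : pvKey a < pvKey b := by
      refine lt_of_le_of_ne hab ?_
      intro hk
      unfold pvKey at hk
      have := toLex_inj.mp hk
      exact hne' (congrArg Prod.snd this)
    unfold pvKey at hlt
    rw [Prod.Lex.toLex_lt_toLex] at hlt
    exact hlt
  · intro e he
    rw [PySem.List.mem_sorted] at he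
    unfold pvTag at he
    simp only [List.mem_map] at he
    obtain ⟨z, hz, rfl⟩ := he
    rw [PySem.List.mem_enumerate_iff] at hz
    obtain ⟨k, hk, rfl⟩ := hz
    exact ⟨rfl, by simp; omega⟩

-- ===== VERDICT (by name: the statement is the Claim_ definition above) =====
theorem concatenationProcess_spec : Claim_equal_concatenationProcess := by
  intro init _ hpre
  unfold Spec_concatenationProcess concatenationProcess concatenationProcess_alt
  have hperm : (pvTag init).Perm (PySem.List.sorted (pvTag init) pvKey false) :=
    (PySem.List.sorted_perm (pvTag init) pvKey false).symm
  obtain ⟨u', hu'p, _, hmap⟩ :=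
    pvLoop_sim init.length (PySem.List.sorted (pvTag init) pvKey false) (pvTag init)
      (init.length : Int) (pvInit_inv init) hperm (pvTag_seq_sorted init)
  rw [pvTag_proj] at hmap
  have hn : init.length ≠ 0 := fun h => hpre (List.length_eq_zero_iff.mp h)
  have hslen : (PySem.List.sorted (pvTag init) pvKey false).length = init.length := by
    rw [(PySem.List.sorted_perm (pvTag init) pvKey false).length_eq]
    simp [pvTag, PySem.List.length_enumerate]
  have hlen1 : (pvLoopB init.length (init.length : Int)
      (PySem.List.sorted (pvTag init) pvKey false)).length = 1 := by
    refine pvLoopB_length_one init.length (init.length : Int) _ ?_ ?_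
    · intro hnil
      rw [hnil] at hslen
      simp at hslen
      exact hn hslen.symm
    · omega
  obtain ⟨e, helist⟩ : ∃ e, pvLoopB init.length (init.length : Int)
      (PySem.List.sorted (pvTag init) pvKey false) = [e] := by
    rcases hl : pvLoopB init.length (init.length : Int)
        (PySem.List.sorted (pvTag init) pvKey false) with _ | ⟨e, tl⟩
    · rw [hl] at hlen1
      simp at hlen1
    · rw [hl] at hlen1
      simp at hlen1
      exact ⟨e, by rw [hlen1]⟩
  rw [helist] at hu'p
  have hu'e : u' = [e] := List.perm_singleton.mp hu'p
  rw [hu'e] at hmap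
  simp only [List.map_cons, List.map_nil] at hmap
  rw [hmap, helist]
  simp [PySem.List.pyGetD_zero_cons]
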